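-- pv_equiv track=rewrite | github.com/bymars/topcoder | srm674/VampireTreeDiv2.py | countMinSamples
-- ===== SOURCE A (Python) =====
-- modulo = 1000000007
--
-- maxInt = 100
--
-- def countMinSamples(A, B):
--     n = len(A) + 1
--     children = [0] * n
--     special = []
--     overall_min_count = maxInt
--     overall_ways = 0
--
--     for i in range(n):
--         children[i] = []
--     for i in range(n-1):
--         if B[i] == -1:
--             children[A[i]].append(i+1)
--         else:
--             special.append(i+1)
--
--     dp = [0] * n
--     for i in range(n):
--         dp[i] = [-1,0] * 2
--
--     t = len(special)
--     for mask in range(1 << t):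
--         pick_option = [0] * n
--         invalid = 0
--         # Set pick_option
--         for i in range(t):
--             x = special[i]
--             p1 = A[x-1]
--             p2 = B[x-1]
--             if mask & 1 << i == 0:
--                 if pick_option[x] == 1 or pick_option[p1] == -1 or pick_option[p2] == -1:
--                     invalid = 1
--                     break
--                 pick_option[p1] = pick_option[p2] = 1
--                 pick_option[x] = -1
--             else:
--                 pick_option[special[i]] = 1
--         if invalid == 1:
--             continue
--
--         # Calculate [min_count, ways] for each vertex from bottom to top
--         # must = 1, pick_option[vertex] = 1 or 0, F(i, 0) + 1
--         # must = 1, pick_option[vertex] = -1, any value is ok since dp[vertex][1] will not be used.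
--         # must = 0, pick_option[vertex] = 1, F(i, 0) + 1
--         # must = 0, pick_option[vertex] = -1, F(i, 1)
--         # must = 0, pick_option[vertex] = 0, F(i, 0) + 1 or F(i, 1)
--         for i in range(n)[::-1]:
--             count_must = count_may = 0
--             ways_must = ways_may = 1
--
--             for j in children[i]:
--                 count_must += dp[j][1][0]
--                 ways_must *= dp[j][1][1] % modulo
--                 count_may += dp[j][0][0]
--                 ways_may *= dp[j][0][1] % modulo
--
--             if pick_option[i] != -1:
--                 dp[i][1] = [1+count_may, ways_may]
--
--             if pick_option[i] == 1:
--                 dp[i][0] = [1+count_may, ways_may]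
--             elif pick_option[i] == -1:
--                 dp[i][0] = [count_must, ways_must]
--             else:
--                 if count_must > 1+count_may:
--                     dp[i][0] = [1+count_may, ways_may]
--                 elif count_must < 1+count_may:
--                     dp[i][0] = [count_must, ways_must]
--                 else:
--                     dp[i][0] = [count_must, (ways_must+ways_may) % modulo]
--
--         [min_count, ways] = dp[0][0]
--         # Add special nodes' result
--         for i in range(t):
--             x = special[i]
--             min_count += dp[x][0][0]
--             ways *= dp[x][0][1]
--
--         if min_count < overall_min_count:
--             overall_min_count = min_count
--             overall_ways = ways
--         elif min_count == overall_min_count: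
--             overall_ways += ways % modulo
--     return overall_ways
-- ===== SOURCE B (Python) =====
-- # B: the mutable bottom-up dp-array pass is replaced by a pure recursive function F(i)
-- # computed per mask from scratch (no dp state at all, none carried across masks).
-- modulo = 1000000007
--
-- maxInt = 100
--
-- def countMinSamples(A, B):
--     n = len(A) + 1
--     children = [[] for _ in range(n)]
--     special = []
--     for i in range(n - 1):
--         if B[i] == -1:
--             children[A[i]].append(i + 1)
--         else:
--             special.append(i + 1)
--
--     def make_pick(mask):
--         pick = [0] * n
--         for i, x in enumerate(special):
--             if mask & (1 << i):
--                 pick[x] = 1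
--             else:
--                 p1, p2 = A[x - 1], B[x - 1]
--                 if pick[x] == 1 or pick[p1] == -1 or pick[p2] == -1:
--                     return None
--                 pick[p1] = pick[p2] = 1
--                 pick[x] = -1
--         return pick
--
--     best = (maxInt, 0)
--     for mask in range(1 << len(special)):
--         pick = make_pick(mask)
--         if pick is None:
--             continue
--
--         def F(i):
--             cm = cy = 0
--             wm = wy = 1
--             for j in children[i]:
--                 fj = F(j)
--                 cm += fj[1][0]
--                 wm *= fj[1][1] % modulo
--                 cy += fj[0][0]
--                 wy *= fj[0][1] % modulo
--             opt1 = (1 + cy, wy)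
--             if pick[i] == 1:
--                 opt0 = opt1
--             elif pick[i] == -1:
--                 opt0 = (cm, wm)
--             elif cm > 1 + cy:
--                 opt0 = opt1
--             elif cm < 1 + cy:
--                 opt0 = (cm, wm)
--             else:
--                 opt0 = (cm, (wm + wy) % modulo)
--             return (opt0, opt1)
--
--         mc, w = F(0)[0]
--         for x in special:
--             f0 = F(x)[0]
--             mc += f0[0]
--             w *= f0[1]
--
--         if mc < best[0]:
--             best = (mc, w)
--         elif mc == best[0]:
--             best = (best[0], best[1] + w % modulo)
--     return best[1]
-- ===== Notes on version B (the rewrite author's own statement) =====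
-- stated objective: alternative
-- what changed: The mutable bottom-up dp-array pass (and the dp state carried across masks) is replaced by a pure recursive per-node function F(i) recomputed from scratch for every mask, with the pick_option construction restyled as an enumerate-driven helper returning None on invalidity; tie-breaks and modular arithmetic are kept verbatim.
import Mathlib
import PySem

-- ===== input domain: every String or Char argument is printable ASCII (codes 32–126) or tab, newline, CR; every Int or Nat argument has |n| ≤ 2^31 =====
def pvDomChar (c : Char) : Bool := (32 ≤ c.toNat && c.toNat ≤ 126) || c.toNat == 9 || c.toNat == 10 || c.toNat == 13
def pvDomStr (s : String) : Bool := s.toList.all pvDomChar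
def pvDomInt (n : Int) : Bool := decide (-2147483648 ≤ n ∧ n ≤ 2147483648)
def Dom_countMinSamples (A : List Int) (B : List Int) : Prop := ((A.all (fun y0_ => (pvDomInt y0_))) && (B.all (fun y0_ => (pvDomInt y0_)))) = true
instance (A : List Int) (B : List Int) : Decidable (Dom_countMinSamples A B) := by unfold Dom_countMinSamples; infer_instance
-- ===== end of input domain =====

-- B replaces A's mutable bottom-up dp-array pass (state carried across masks) by a pure
-- recursive per-node function recomputed from scratch for each mask; everything kept
-- identical in value (objective: alternative decomposition, same cost).

-- ===== PORT A =====
-- Shared tree/constant helpers (both Pythons build children/special identically).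
-- dp entry = ((dp[i][0] as pair), (dp[i][1] as pair)); A's initial scalar entries [-1,0,-1,0]
-- are modelled as ((-1,0),(-1,0)) — inside Pre_ those slots are never read as pairs before
-- being written (reading a scalar slot is exactly the TypeError Pre_ excludes).
def pvMod : Int := 1000000007

-- Python's negative list-index wraparound (exact for -n ≤ v < n, the range Pre_ admits)
def pvWrap (n : Nat) (v : Int) : Int := if v < 0 then v + (n : Int) else v

abbrev PvEntry := (Int × Int) × (Int × Int)
abbrev PvDP := Nat → PvEntry

-- body of 'for i in range(n-1): if B[i] == -1: children[A[i]].append(i+1) else: special.append(i+1)'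
def pvBuildStep (A B : List Int) (n : Nat) (st : (Int → List Nat) × List Nat) (i : Nat) :
    (Int → List Nat) × List Nat :=
  if B.getD i 0 = -1 then
    (fun v => if v = pvWrap n (A.getD i 0) then st.1 v ++ [i + 1] else st.1 v, st.2)
  else (st.1, st.2 ++ [i + 1])

def pvBuild (A B : List Int) (n : Nat) : (Int → List Nat) × List Nat :=
  (List.range (n - 1)).foldl (pvBuildStep A B n) (fun _ => [], [])

-- A's 'Set pick_option' loop (bit index, remaining specials); none = invalid (the 'break')
def pvSetPick (A B : List Int) (n : Nat) (mask : Nat) : Nat → List Nat → (Int → Int) → Option (Int → Int)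
  | _, [], pk => some pk
  | i, x :: rest, pk =>
    let p1 := pvWrap n (A.getD (x - 1) 0)
    let p2 := pvWrap n (B.getD (x - 1) 0)
    if mask &&& (1 <<< i) = 0 then
      if pk x = 1 ∨ pk p1 = -1 ∨ pk p2 = -1 then none
      else pvSetPick A B n mask (i + 1) rest
        (fun v => if v = (x : Int) then -1 else if v = p2 then 1 else if v = p1 then 1 else pk v)
    else pvSetPick A B n mask (i + 1) rest (fun v => if v = (x : Int) then 1 else pk v)

-- A's branch block: [new dp[i][0], new dp[i][1]] from (count_must, ways_must, count_may, ways_may)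
def pvEntry (pk : Int → Int) (i : Nat) (a : Int × Int × Int × Int) : PvEntry :=
  (if pk i = 1 then (1 + a.2.2.1, a.2.2.2)
   else if pk i = -1 then (a.1, a.2.1)
   else if a.1 > 1 + a.2.2.1 then (1 + a.2.2.1, a.2.2.2)
   else if a.1 < 1 + a.2.2.1 then (a.1, a.2.1)
   else (a.1, PySem.Int.mod (a.2.1 + a.2.2.2) pvMod),
   (1 + a.2.2.1, a.2.2.2))

-- write dp[i]: dp[i][1] only when pick_option[i] != -1, dp[i][0] always
def pvWriteDp (pk : Int → Int) (i : Nat) (a : Int × Int × Int × Int) (dp : PvDP) : PvDP :=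
  fun v => if v = i then ((pvEntry pk i a).1, if pk i = -1 then (dp i).2 else (pvEntry pk i a).2) else dp v

-- A's inner 'for j in children[i]' accumulation, reading the current dp array
def pvAccA (dp : PvDP) (js : List Nat) : Int × Int × Int × Int :=
  js.foldl (fun a j =>
    (a.1 + (dp j).2.1, a.2.1 * PySem.Int.mod (dp j).2.2 pvMod,
     a.2.2.1 + (dp j).1.1, a.2.2.2 * PySem.Int.mod (dp j).1.2 pvMod)) (0, 1, 0, 1)

-- A's 'for i in range(n)[::-1]' pass, as a countdown recursion (processes n-1, n-2, …, 0)
def pvPassA (ch : Int → List Nat) (pk : Int → Int) : Nat → PvDP → PvDP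
  | 0, dp => dp
  | k + 1, dp => pvPassA ch pk k (pvWriteDp pk k (pvAccA dp (ch k)) dp)

-- final accumulation: dp[0][0], then '+= dp[x][0][0]' and '*= dp[x][0][1]' over the specials
def pvCollect (dp : PvDP) (sp : List Nat) : Int × Int :=
  sp.foldl (fun (a : Int × Int) x => (a.1 + (dp x).1.1, a.2 * (dp x).1.2)) ((dp 0).1.1, (dp 0).1.2)

-- the overall_min_count / overall_ways update (shared; identical in both Pythons)
def pvUpd (mc w : Int) (o : Int × Int) : Int × Int :=
  if mc < o.1 then (mc, w) else if mc = o.1 then (o.1, o.2 + PySem.Int.mod w pvMod) else o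

def countMinSamples (A : List Int) (B : List Int) : Int :=
  let n := A.length + 1
  let cs := pvBuild A B n
  let t := cs.2.length
  ((List.range (2 ^ t)).foldl
    (fun (st : PvDP × Int × Int) mask =>
      match pvSetPick A B n mask 0 cs.2 (fun _ => 0) with
      | none => st
      | some pk =>
        let dp' := pvPassA cs.1 pk n st.1
        let mw := pvCollect dp' cs.2
        (dp', pvUpd mw.1 mw.2 (st.2.1, st.2.2)))
    (fun _ => ((-1, 0), (-1, 0)), (100 : Int), (0 : Int))).2.2

-- ===== PORT B =====
-- B's make_pick(mask): 'for i, x in enumerate(special)' as a fold carrying the enumerate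
-- counter and an Option pick (None = invalid); branch order as in Source B ('if mask & (1<<i)').
def pvPickB (A B : List Int) (n : Nat) (sp : List Nat) (mask : Nat) : Option (Int → Int) :=
  (sp.foldl
    (fun (st : Nat × Option (Int → Int)) (x : Nat) =>
      (st.1 + 1,
       match st.2 with
       | none => none
       | some pk =>
         if mask &&& (1 <<< st.1) ≠ 0 then some (fun v => if v = (x : Int) then 1 else pk v)
         else
           let p1 := pvWrap n (A.getD (x - 1) 0)
           let p2 := pvWrap n (B.getD (x - 1) 0)
           if pk x = 1 ∨ pk p1 = -1 ∨ pk p2 = -1 then none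
           else some (fun v =>
             if v = (x : Int) then -1 else if v = p2 then 1 else if v = p1 then 1 else pk v)))
    (0, some (fun _ => 0))).2

-- B's pure recursive F(i): recurse into children, then the same branch block, returning
-- (opt0, opt1); fuel only makes the recursion structural (inside Pre_ children indices
-- strictly increase, so fuel = n never runs out).
def pvF (ch : Int → List Nat) (pk : Int → Int) : Nat → Nat → PvEntry
  | 0, _ => ((-1, 0), (-1, 0))
  | fuel + 1, i =>
    pvEntry pk i ((ch i).foldl (fun a j =>
      (a.1 + (pvF ch pk fuel j).2.1, a.2.1 * PySem.Int.mod (pvF ch pk fuel j).2.2 pvMod,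
       a.2.2.1 + (pvF ch pk fuel j).1.1, a.2.2.2 * PySem.Int.mod (pvF ch pk fuel j).1.2 pvMod)) (0, 1, 0, 1))

-- B's per-mask answer: F(0)[0], then the specials' F(x)[0] folded in
def pvCollectB (ch : Int → List Nat) (pk : Int → Int) (n : Nat) (sp : List Nat) : Int × Int :=
  sp.foldl (fun (a : Int × Int) x => (a.1 + (pvF ch pk n x).1.1, a.2 * (pvF ch pk n x).1.2))
    ((pvF ch pk n 0).1.1, (pvF ch pk n 0).1.2)

def countMinSamples_alt (A : List Int) (B : List Int) : Int :=
  let n := A.length + 1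
  let cs := pvBuild A B n
  ((List.range (2 ^ cs.2.length)).foldl
    (fun (o : Int × Int) mask =>
      match pvPickB A B n cs.2 mask with
      | none => o
      | some pk =>
        let mw := pvCollectB cs.1 pk n cs.2
        pvUpd mw.1 mw.2 o)
    ((100 : Int), (0 : Int))).2

-- ===== PRECONDITION & SPEC =====
-- Pre_ = the problem's well-formed inputs, exactly where the Python A returns normally:
-- len(B) ≥ len(A); a normal node's parent index A[i] is in range and (after Python's
-- negative-index wrap) is ≤ i, i.e. an already-numbered vampire; a special node's two parent
-- indices are in range.  Outside Pre_ A raises: IndexError, or TypeError from subscripting a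
-- never-assigned scalar dp slot, which any forward/self parent edge makes the flat pass read.
def Pre_countMinSamples (A : List Int) (B : List Int) : Prop :=
  A.length ≤ B.length ∧
  ∀ i < A.length,
    (B.getD i 0 = -1 →
      -((A.length + 1 : Nat) : Int) ≤ A.getD i 0 ∧ A.getD i 0 < ((A.length + 1 : Nat) : Int) ∧
      pvWrap (A.length + 1) (A.getD i 0) ≤ (i : Int)) ∧
    (B.getD i 0 ≠ -1 →
      -((A.length + 1 : Nat) : Int) ≤ A.getD i 0 ∧ A.getD i 0 < ((A.length + 1 : Nat) : Int) ∧
      -((A.length + 1 : Nat) : Int) ≤ B.getD i 0 ∧ B.getD i 0 < ((A.length + 1 : Nat) : Int))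

instance (A : List Int) (B : List Int) : Decidable (Pre_countMinSamples A B) := by
  unfold Pre_countMinSamples; infer_instance

def pvWitness_countMinSamples : List Int × List Int := ([0, 0, 1], [-1, 2, -1])

def Spec_countMinSamples (A : List Int) (B : List Int) (out : Int) : Prop := out = countMinSamples_alt A B
instance (A : List Int) (B : List Int) (out : Int) : Decidable (Spec_countMinSamples A B out) := by unfold Spec_countMinSamples; infer_instance

-- ===== CLAIM (what is proved, stated in full; the proofs are below) =====
def Claim_equal_countMinSamples : Prop := ∀ (A : List Int) (B : List Int), Dom_countMinSamples A B → Pre_countMinSamples A B → Spec_countMinSamples A B (countMinSamples A B)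

-- ===== LEMMAS AND PROOFS =====

def pvRel (ch : Int → List Nat) (pk : Int → Int) (n : Nat) (dp : PvDP) (j : Nat) : Prop :=
  (dp j).1 = (pvF ch pk (n - j) j).1 ∧ (pk j ≠ -1 → (dp j).2 = (pvF ch pk (n - j) j).2)
def pvChOk (ch : Int → List Nat) (n : Nat) : Prop :=
  ∀ (i : Nat) (j : Nat), j ∈ ch (i : Int) → i < j ∧ j < n

lemma pvF_stab (ch : Int → List Nat) (pk : Int → Int) (n : Nat) (hch : pvChOk ch n) :
    ∀ f1 f2 i, i < n → n - i ≤ f1 → n - i ≤ f2 → pvF ch pk f1 i = pvF ch pk f2 i := by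
  intro f1
  induction f1 with
  | zero => intro f2 i hi h1 h2; omega
  | succ f1 ih =>
    intro f2 i hi h1 h2
    cases f2 with
    | zero => omega
    | succ f2 =>
      simp only [pvF]
      congr 1
      apply PySem.List.foldl_congr_mem
      intro acc j hj
      obtain ⟨hlt, hjn⟩ := hch i j hj
      rw [ih f2 j hjn (by omega) (by omega)]

-- full dp equality at a node whose pick is ≠ -1
lemma pvRel_full (ch : Int → List Nat) (pk : Int → Int) (n : Nat) (dp : PvDP) (j : Nat)
    (h : pvRel ch pk n dp j) (hpk : pk j ≠ -1) : dp j = pvF ch pk (n - j) j := by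
  obtain ⟨h1, h2⟩ := h
  have := h2 hpk
  exact Prod.ext h1 this

-- the accumulated tuple equals pvF's fold when every child satisfies full pvRel
lemma pvAccA_eq (ch : Int → List Nat) (pk : Int → Int) (n : Nat) (hch : pvChOk ch n)
    (dp : PvDP) (k : Nat) (hk : k < n)
    (hrel : ∀ j ∈ ch (k : Int), dp j = pvF ch pk (n - j) j) :
    pvAccA dp (ch k) =
      (ch (k : Int)).foldl (fun a j =>
        (a.1 + (pvF ch pk (n - k - 1) j).2.1, a.2.1 * PySem.Int.mod (pvF ch pk (n - k - 1) j).2.2 pvMod,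
         a.2.2.1 + (pvF ch pk (n - k - 1) j).1.1, a.2.2.2 * PySem.Int.mod (pvF ch pk (n - k - 1) j).1.2 pvMod)) (0, 1, 0, 1) := by
  unfold pvAccA
  apply PySem.List.foldl_congr_mem
  intro acc j hj
  obtain ⟨hlt, hjn⟩ := hch k j hj
  rw [hrel j hj, pvF_stab ch pk n hch (n - j) (n - k - 1) j hjn (by omega) (by omega)]

lemma pvF_succ (ch : Int → List Nat) (pk : Int → Int) (n k : Nat) (hk : k < n) :
    pvF ch pk (n - k) k = pvEntry pk k ((ch k).foldl (fun a j =>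
      (a.1 + (pvF ch pk (n - k - 1) j).2.1, a.2.1 * PySem.Int.mod (pvF ch pk (n - k - 1) j).2.2 pvMod,
       a.2.2.1 + (pvF ch pk (n - k - 1) j).1.1, a.2.2.2 * PySem.Int.mod (pvF ch pk (n - k - 1) j).1.2 pvMod)) (0, 1, 0, 1)) := by
  have h : n - k = (n - k - 1) + 1 := by omega
  rw [h]
  simp only [pvF, Nat.add_sub_cancel]

lemma pvPassA_rel (ch : Int → List Nat) (pk : Int → Int) (n : Nat) (hch : pvChOk ch n)
    (hpk : ∀ j : Nat, (∃ v : Int, j ∈ ch v) → pk j ≠ -1) :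
    ∀ k, k ≤ n → ∀ dp, (∀ j, k ≤ j → j < n → pvRel ch pk n dp j) →
      (∀ i, i < n → pvRel ch pk n (pvPassA ch pk k dp) i) ∧
      (∀ i, k ≤ i → pvPassA ch pk k dp i = dp i) := by
  intro k
  induction k with
  | zero =>
    intro _ dp hdp
    refine ⟨fun i hi => hdp i (Nat.zero_le i) hi, fun i _ => rfl⟩
  | succ k ih =>
    intro hk dp hdp
    have hkn : k < n := by omega
    set dp' := pvWriteDp pk k (pvAccA dp (ch k)) dp with hdp'
    have hchild : ∀ j ∈ ch (k : Int), dp j = pvF ch pk (n - j) j := by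
      intro j hj
      obtain ⟨hlt, hjn⟩ := hch k j hj
      exact pvRel_full ch pk n dp j (hdp j (by omega) hjn) (hpk j ⟨k, hj⟩)
    have hacc := pvAccA_eq ch pk n hch dp k hkn hchild
    have hFk := pvF_succ ch pk n k hkn
    have hrelk : pvRel ch pk n dp' k := by
      constructor
      · show (dp' k).1 = _
        simp only [hdp', pvWriteDp, if_true, hacc, hFk]
      · intro hne
        show (dp' k).2 = _
        simp only [hdp', pvWriteDp, if_true]
        rw [if_neg hne, hacc, hFk]
    have hdp'' : ∀ j, k ≤ j → j < n → pvRel ch pk n dp' j := by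
      intro j hj hjn
      rcases Nat.eq_or_lt_of_le hj with h | h
      · exact h ▸ hrelk
      · have : dp' j = dp j := by
          simp only [hdp', pvWriteDp]; rw [if_neg (by omega)]
        constructor
        · rw [this]; exact (hdp j (by omega) hjn).1
        · intro hne; rw [this]; exact (hdp j (by omega) hjn).2 hne
    have := ih (by omega) dp' hdp''
    refine ⟨this.1, fun i hi => ?_⟩
    show pvPassA ch pk (k+1) dp i = dp i
    have h1 : pvPassA ch pk (k+1) dp i = pvPassA ch pk k dp' i := rfl
    rw [h1, this.2 i (by omega)]
    simp only [hdp', pvWriteDp]; rw [if_neg (by omega)]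

-- B's enumerate-fold pick builder equals A's recursive pick builder
lemma pvPickB_none (A B : List Int) (n : Nat) (mask : Nat) :
    ∀ (sp : List Nat) (i : Nat),
      (sp.foldl
        (fun (st : Nat × Option (Int → Int)) (x : Nat) =>
          (st.1 + 1,
           match st.2 with
           | none => none
           | some pk =>
             if mask &&& (1 <<< st.1) ≠ 0 then some (fun v => if v = (x : Int) then 1 else pk v)
             else
               let p1 := pvWrap n (A.getD (x - 1) 0)
               let p2 := pvWrap n (B.getD (x - 1) 0)
               if pk x = 1 ∨ pk p1 = -1 ∨ pk p2 = -1 then none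
               else some (fun v =>
                 if v = (x : Int) then -1 else if v = p2 then 1 else if v = p1 then 1 else pk v)))
        (i, (none : Option (Int → Int)))).2 = none := by
  intro sp
  induction sp with
  | nil => intro i; rfl
  | cons x rest ih => intro i; exact ih (i + 1)

lemma pvPickB_eq_aux (A B : List Int) (n : Nat) (mask : Nat) :
    ∀ (sp : List Nat) (i : Nat) (pk : Int → Int),
      (sp.foldl
        (fun (st : Nat × Option (Int → Int)) (x : Nat) =>
          (st.1 + 1,
           match st.2 with
           | none => none
           | some pk =>
             if mask &&& (1 <<< st.1) ≠ 0 then some (fun v => if v = (x : Int) then 1 else pk v)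
             else
               let p1 := pvWrap n (A.getD (x - 1) 0)
               let p2 := pvWrap n (B.getD (x - 1) 0)
               if pk x = 1 ∨ pk p1 = -1 ∨ pk p2 = -1 then none
               else some (fun v =>
                 if v = (x : Int) then -1 else if v = p2 then 1 else if v = p1 then 1 else pk v)))
        (i, some pk)).2 = pvSetPick A B n mask i sp pk := by
  intro sp
  induction sp with
  | nil => intro i pk; rfl
  | cons x rest ih =>
    intro i pk
    simp only [List.foldl_cons, pvSetPick]
    by_cases hbit : mask &&& (1 <<< i) = 0
    · simp only [hbit, ne_eq, not_true_eq_false, ite_false]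
      by_cases hinv : pk x = 1 ∨ pk (pvWrap n (A.getD (x - 1) 0)) = -1 ∨ pk (pvWrap n (B.getD (x - 1) 0)) = -1
      · simp only [hinv, if_pos]
        exact pvPickB_none A B n mask rest (i + 1)
      · simp only [hinv, ite_false]
        exact ih (i + 1) _
    · simp only [hbit, ne_eq, not_false_eq_true, if_pos]
      exact ih (i + 1) _

lemma pvPickB_eq (A B : List Int) (n : Nat) (sp : List Nat) (mask : Nat) :
    pvPickB A B n sp mask = pvSetPick A B n mask 0 sp (fun _ => 0) := by
  unfold pvPickB
  exact pvPickB_eq_aux A B n mask sp 0 (fun _ => 0)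

-- where B's pick retuns -1, the node is a special (used to show children never have pick -1)
lemma pvSetPick_neg (A B : List Int) (n : Nat) (mask : Nat) :
    ∀ (xs : List Nat) (i : Nat) (pk₀ pk : Int → Int),
      pvSetPick A B n mask i xs pk₀ = some pk →
      ∀ z, pk z = -1 → pk₀ z = -1 ∨ ∃ x ∈ xs, z = (x : Int) := by
  intro xs
  induction xs with
  | nil =>
    intro i pk₀ pk h z hz
    simp only [pvSetPick, Option.some.injEq] at h
    exact Or.inl (h ▸ hz)
  | cons x rest ihx =>
    intro i pk₀ pk h z hz
    simp only [pvSetPick] at h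
    by_cases hbit : mask &&& (1 <<< i) = 0
    · rw [if_pos hbit] at h
      by_cases hinv : pk₀ x = 1 ∨ pk₀ (pvWrap n (A.getD (x - 1) 0)) = -1 ∨ pk₀ (pvWrap n (B.getD (x - 1) 0)) = -1
      · rw [if_pos hinv] at h; exact absurd h (by simp)
      · rw [if_neg hinv] at h
        rcases ihx (i + 1) _ pk h z hz with h' | ⟨y, hy, hzy⟩
        · by_cases h1 : z = (x : Int)
          · exact Or.inr ⟨x, List.mem_cons_self .., h1⟩
          · rw [if_neg h1] at h'
            by_cases h2 : z = pvWrap n (B.getD (x - 1) 0)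
            · rw [if_pos h2] at h'; exact absurd h' (by norm_num)
            · rw [if_neg h2] at h'
              by_cases h3 : z = pvWrap n (A.getD (x - 1) 0)
              · rw [if_pos h3] at h'; exact absurd h' (by norm_num)
              · rw [if_neg h3] at h'; exact Or.inl h'
        · exact Or.inr ⟨y, List.mem_cons_of_mem _ hy, hzy⟩
    · rw [if_neg hbit] at h
      rcases ihx (i + 1) _ pk h z hz with h' | ⟨y, hy, hzy⟩
      · by_cases h1 : z = (x : Int)
        · rw [if_pos h1] at h'; exact absurd h' (by norm_num)
        · rw [if_neg h1] at h'; exact Or.inl h'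
      · exact Or.inr ⟨y, List.mem_cons_of_mem _ hy, hzy⟩

lemma pvBuild_props (A B : List Int) (n : Nat) : ∀ m,
    (∀ (v : Int) (j : Nat), j ∈ ((List.range m).foldl (pvBuildStep A B n) (fun _ => [], [])).1 v →
       1 ≤ j ∧ j ≤ m ∧ B.getD (j - 1) 0 = -1 ∧ v = pvWrap n (A.getD (j - 1) 0)) ∧
    (∀ x ∈ ((List.range m).foldl (pvBuildStep A B n) (fun _ => [], [])).2,
       1 ≤ x ∧ x ≤ m ∧ B.getD (x - 1) 0 ≠ -1) := by
  intro m
  induction m with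
  | zero => simp
  | succ m ih =>
    obtain ⟨ih1, ih2⟩ := ih
    rw [List.range_succ, List.foldl_append, List.foldl_cons, List.foldl_nil]
    set st := (List.range m).foldl (pvBuildStep A B n) (fun _ => [], []) with hst
    by_cases hb : B.getD m 0 = -1
    · refine ⟨?_, ?_⟩
      · intro v j hj
        simp only [pvBuildStep, if_pos hb] at hj
        by_cases hv : v = pvWrap n (A.getD m 0)
        · rw [if_pos hv] at hj
          rcases List.mem_append.1 hj with h | h
          · obtain ⟨a1, a2, a3, a4⟩ := ih1 v j h
            exact ⟨a1, by omega, a3, a4⟩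
          · have : j = m + 1 := by simpa using h
            subst this
            simpa using ⟨hb, hv⟩
        · rw [if_neg hv] at hj
          obtain ⟨a1, a2, a3, a4⟩ := ih1 v j hj
          exact ⟨a1, by omega, a3, a4⟩
      · intro x hx
        simp only [pvBuildStep, if_pos hb] at hx
        obtain ⟨a1, a2, a3⟩ := ih2 x hx
        exact ⟨a1, by omega, a3⟩
    · refine ⟨?_, ?_⟩
      · intro v j hj
        simp only [pvBuildStep, if_neg hb] at hj
        obtain ⟨a1, a2, a3, a4⟩ := ih1 v j hj
        exact ⟨a1, by omega, a3, a4⟩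
      · intro x hx
        simp only [pvBuildStep, if_neg hb] at hx
        rcases List.mem_append.1 hx with h | h
        · obtain ⟨a1, a2, a3⟩ := ih2 x h
          exact ⟨a1, by omega, a3⟩
        · have : x = m + 1 := by simpa using h
          subst this
          simpa using hb

-- A's collected per-mask value equals B's direct pvF collection
lemma pvCollect_eq_B (ch : Int → List Nat) (pk : Int → Int) (n : Nat) (hch : pvChOk ch n)
    (h0n : 0 < n) (sp : List Nat) (hsp : ∀ x ∈ sp, x < n) (dp : PvDP)
    (hrel : ∀ i, i < n → pvRel ch pk n dp i) :
    pvCollect dp sp = pvCollectB ch pk n sp := by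
  have hpt : ∀ x, x < n → (dp x).1 = (pvF ch pk n x).1 := by
    intro x hx
    rw [(hrel x hx).1, pvF_stab ch pk n hch (n - x) n x hx (by omega) (by omega)]
  unfold pvCollect pvCollectB
  rw [hpt 0 h0n]
  apply PySem.List.foldl_congr_mem
  intro acc x hxm
  rw [hpt x (hsp x hxm)]

lemma pvMaskFold (A B : List Int) (n : Nat) (ch : Int → List Nat) (sp : List Nat)
    (hch : pvChOk ch n) (h0n : 0 < n) (hsp : ∀ x ∈ sp, x < n)
    (hpkgen : ∀ (mask : Nat) (pk : Int → Int), pvSetPick A B n mask 0 sp (fun _ => 0) = some pk →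
       ∀ j : Nat, (∃ v : Int, j ∈ ch v) → pk j ≠ -1) :
    ∀ (ms : List Nat) (dpA : PvDP) (o : Int × Int),
      (ms.foldl (fun (st : PvDP × Int × Int) mask =>
        match pvSetPick A B n mask 0 sp (fun _ => 0) with
        | none => st
        | some pk =>
          let dp' := pvPassA ch pk n st.1
          let mw := pvCollect dp' sp
          (dp', pvUpd mw.1 mw.2 (st.2.1, st.2.2))) (dpA, o)).2 =
      ms.foldl (fun (o : Int × Int) mask =>
        match pvPickB A B n sp mask with
        | none => o
        | some pk =>
          let mw := pvCollectB ch pk n sp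
          pvUpd mw.1 mw.2 o) o := by
  intro ms
  induction ms with
  | nil => intro dpA o; rfl
  | cons m ms ihm =>
    intro dpA o
    rw [List.foldl_cons, List.foldl_cons, pvPickB_eq A B n sp m]
    cases h : pvSetPick A B n m 0 sp (fun _ => 0) with
    | none => exact ihm dpA o
    | some pk =>
      have hpk := hpkgen m pk h
      have relA := (pvPassA_rel ch pk n hch hpk n le_rfl dpA (by intro j h1 h2; omega)).1
      have hcoll := pvCollect_eq_B ch pk n hch h0n sp hsp (pvPassA ch pk n dpA) relA
      simp only [hcoll]
      exact ihm _ _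

theorem pvMain (A B : List Int) (hpre : Pre_countMinSamples A B) :
    countMinSamples A B = countMinSamples_alt A B := by
  obtain ⟨hlen, hP⟩ := hpre
  set n := A.length + 1 with hn
  have hcs : pvBuild A B n = (List.range A.length).foldl (pvBuildStep A B n) (fun _ => [], []) := rfl
  obtain ⟨hb1, hb2⟩ := pvBuild_props A B n A.length
  rw [← hcs] at hb1 hb2
  set cs := pvBuild A B n with hcsdef
  have hch : pvChOk cs.1 n := by
    intro i j hj
    obtain ⟨a1, a2, a3, a4⟩ := hb1 (i : Int) j hj
    have hj1 : j - 1 < A.length := by omega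
    have hw := ((hP (j - 1) hj1).1 a3).2.2
    rw [← a4] at hw
    have : i ≤ j - 1 := by exact_mod_cast hw
    omega
  have hsp : ∀ x ∈ cs.2, x < n := by
    intro x hx
    have := (hb2 x hx).2.1
    omega
  have hpkgen : ∀ (mask : Nat) (pk : Int → Int), pvSetPick A B n mask 0 cs.2 (fun _ => 0) = some pk →
      ∀ j : Nat, (∃ v : Int, j ∈ cs.1 v) → pk j ≠ -1 := by
    intro mask pk h j hjv heq
    rcases pvSetPick_neg A B n mask cs.2 0 (fun _ => 0) pk h (j : Int) heq with h' | ⟨x, hx, hjx⟩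
    · exact absurd h' (by norm_num)
    · obtain ⟨v, hv⟩ := hjv
      have hjx' : j = x := by exact_mod_cast hjx
      exact (hb2 x hx).2.2 (hjx' ▸ (hb1 v j hv).2.2.1)
  exact congrArg Prod.snd (pvMaskFold A B n cs.1 cs.2 hch (by omega) hsp hpkgen
    (List.range (2 ^ cs.2.length)) (fun _ => ((-1, 0), (-1, 0))) ((100 : Int), (0 : Int)))

-- ===== VERDICT (by name: the statement is the Claim_ definition above) =====
theorem countMinSamples_spec : Claim_equal_countMinSamples := by
  intro A B _ hpre
  unfold Spec_countMinSamples
  exact pvMain A B hpre
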